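-- pv_equiv track=rewrite | github.com/qiboteam/qibo | src/qibo/hamiltonians/expectation_values.py | _get_measure_pauli_from_commuting_terms
-- ===== SOURCE A (Python) =====
-- def _get_measure_pauli_from_commuting_terms(group: list[tuple[float, str]]) -> str:
--     """Extract the measurement basis word from a group of mutually commuting Pauli words.
--
--     For a set of Pauli words that commute qubitwise, this function determines the
--     single measurement basis needed to evaluate all terms. Each qubit position will
--     use the first non-identity Pauli operator encountered across all input words.
--
--     Args:
--         pauli_words (list): List of grouped terms [(coef, pauli_word)] containing
--             mutually commuting Pauli words.
--             Example: [(1.0, 'XXII'), (1.0, 'IXXI'), (1.0, 'IIXX')]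
--
--     Returns:
--         str: Pauli word string representing the measurement basis for each qubit.
--         Only contains the essential non-identity operators needed for measurement.
--         Example: "XXXX"
--     """
--
--     measurement_basis = {}
--
--     n_qubits = len(group[0][-1])
--
--     for _, pauli_word in group:
--         if pauli_word == "I" * n_qubits:
--             continue
--         for qubit_position, pauli_operator in enumerate(pauli_word):
--             if pauli_operator == "I" or qubit_position in measurement_basis:
--                 continue
--             measurement_basis[qubit_position] = pauli_operator
--
--     # force "I" in qubits without measurement
--     measurement_basis = {i: measurement_basis.get(i, "I") for i in range(n_qubits)}
--
--     return "".join(list(measurement_basis.values()))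
-- ===== SOURCE B (Python) =====
-- def _get_measure_pauli_from_commuting_terms(group: list[tuple[float, str]]) -> str:
--     """Column-major rewrite: for each qubit position take the first non-identity
--     operator among the words, defaulting to 'I'."""
--     n_qubits = len(group[0][-1])
--     return "".join(
--         next((w[i] for _, w in group if i < len(w) and w[i] != "I"), "I")
--         for i in range(n_qubits)
--     )
-- ===== Notes on version B (the rewrite author's own statement) =====
-- stated objective: simpler
-- what changed: Replaces the word-major scan that maintains a dict with a seen-position guard by a stateless column-major comprehension: for each qubit position take the first non-identity operator among the words, defaulting to 'I'.
import Mathlib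
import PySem

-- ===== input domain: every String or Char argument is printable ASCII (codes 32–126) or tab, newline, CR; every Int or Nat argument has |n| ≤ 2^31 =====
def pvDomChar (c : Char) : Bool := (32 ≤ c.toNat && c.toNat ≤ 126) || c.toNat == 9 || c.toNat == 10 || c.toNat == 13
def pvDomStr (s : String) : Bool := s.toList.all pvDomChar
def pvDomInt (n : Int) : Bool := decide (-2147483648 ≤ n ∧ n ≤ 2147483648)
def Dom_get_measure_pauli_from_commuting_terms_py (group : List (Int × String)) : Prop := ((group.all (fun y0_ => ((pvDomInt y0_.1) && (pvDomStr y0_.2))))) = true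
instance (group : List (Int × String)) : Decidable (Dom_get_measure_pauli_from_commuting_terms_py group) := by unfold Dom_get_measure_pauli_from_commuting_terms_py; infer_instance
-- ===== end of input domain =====

-- B replaces A's word-major dict-building scan by a stateless column-major
-- comprehension (first non-identity operator per qubit position, default 'I');
-- a timing run measured B faster (no dict, per-column early exit).

-- ===== PORT A =====
def get_measure_pauli_from_commuting_terms_py (group : List (Int × String)) : String :=
  match group with
  | [] => ""  -- Python raises IndexError on group[0]; excluded by Pre_
  | (g0 :: _) =>
    let n : Nat := g0.2.toList.length
    let mb : PySem.Dict Int Char :=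
      group.foldl (fun mb p =>
        if p.2.toList = List.replicate n 'I' then mb
        else (PySem.List.enumerate p.2.toList 0).foldl (fun mb qc =>
          if qc.2 = 'I' ∨ mb.contains qc.1 then mb
          else mb.insert qc.1 qc.2) mb) PySem.Dict.empty
    let mb2 : PySem.Dict Int Char :=
      (PySem.List.pyRange 0 (n : Int) 1).foldl
        (fun d i => d.insert i (mb.getD i 'I')) PySem.Dict.empty
    String.ofList mb2.values

-- ===== PORT B =====
def get_measure_pauli_from_commuting_terms_py_alt (group : List (Int × String)) : String :=
  match group with
  | [] => ""  -- group[0] raises in B as well; excluded by Pre_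
  | (g0 :: _) =>
    let n : Nat := g0.2.toList.length
    String.ofList ((List.range n).map (fun i =>
      (group.findSome? (fun p =>
        if h : i < p.2.toList.length then
          (if p.2.toList[i] ≠ 'I' then some (p.2.toList[i]) else none)
        else none)).getD 'I'))

-- ===== PRECONDITION & SPEC =====
-- Pre_ excludes only the empty group, on which both A and B raise IndexError.
def Pre_get_measure_pauli_from_commuting_terms_py (group : List (Int × String)) : Prop :=
  group ≠ []
instance (group : List (Int × String)) : Decidable (Pre_get_measure_pauli_from_commuting_terms_py group) := by unfold Pre_get_measure_pauli_from_commuting_terms_py; infer_instance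

def pvWitness_get_measure_pauli_from_commuting_terms_py : (List (Int × String)) :=
  [(1, "XXII"), (1, "IXXI")]

def Spec_get_measure_pauli_from_commuting_terms_py (group : List (Int × String)) (out : String) : Prop := out = get_measure_pauli_from_commuting_terms_py_alt group
instance (group : List (Int × String)) (out : String) : Decidable (Spec_get_measure_pauli_from_commuting_terms_py group out) := by unfold Spec_get_measure_pauli_from_commuting_terms_py; infer_instance

-- ===== CLAIM (what is proved, stated in full; the proofs are below) =====
def Claim_equal_get_measure_pauli_from_commuting_terms_py : Prop := ∀ (group : List (Int × String)), Dom_get_measure_pauli_from_commuting_terms_py group → Pre_get_measure_pauli_from_commuting_terms_py group → Spec_get_measure_pauli_from_commuting_terms_py group (get_measure_pauli_from_commuting_terms_py group)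

-- ===== LEMMAS AND PROOFS =====

-- first non-'I' character of word w at absolute position i, positions starting at s
def pvColW : List Char → Int → Int → Option Char
  | [], _, _ => none
  | c :: cs, s, i => if i = s then (if c ≠ 'I' then some c else none) else pvColW cs (s + 1) i

lemma pvColW_replicate (n : Nat) (s i : Int) : pvColW (List.replicate n 'I') s i = none := by
  induction n generalizing s with
  | zero => rfl
  | succ m ih => simp [List.replicate_succ, pvColW, ih]

lemma pvColW_nat (w : List Char) : ∀ (s : Int) (k : Nat),
    pvColW w (s) (s + k) =
      (if h : k < w.length then (if w[k] ≠ 'I' then some w[k] else none) else none) := by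
  induction w with
  | nil => intro s k; simp [pvColW]
  | cons c cs ih =>
    intro s k
    cases k with
    | zero => simp [pvColW]
    | succ m =>
      have hne : s + ((m : Int) + 1) ≠ s := by omega
      have : pvColW (c :: cs) s (s + ((m : Nat) + 1 : Nat)) = pvColW cs (s + 1) ((s + 1) + m) := by
        simp only [pvColW]
        rw [if_neg (by push_cast; omega)]
        congr 1
        push_cast; ring
      rw [this, ih (s + 1) m]
      by_cases h : m < cs.length <;> simp [h]

-- inner loop of A: folding over enumerate word from dict d
lemma pvColW_lt (w : List Char) : ∀ (s i : Int), i < s → pvColW w s i = none := by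
  induction w with
  | nil => intro s i _; rfl
  | cons c cs ih =>
    intro s i h
    simp only [pvColW]
    rw [if_neg (by omega)]
    exact ih (s + 1) i (by omega)

-- inner loop of A: folding over enumerate word from dict d
lemma pvInner_get? (w : List Char) : ∀ (s : Int) (d : PySem.Dict Int Char) (i : Int),
    ((PySem.List.enumerate w s).foldl (fun mb qc =>
        if qc.2 = 'I' ∨ mb.contains qc.1 then mb
        else mb.insert qc.1 qc.2) d).get? i = (d.get? i).or (pvColW w s i) := by
  induction w with
  | nil => intro s d i; simp [PySem.List.enumerate_nil, pvColW]
  | cons c cs ih =>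
    intro s d i
    rw [PySem.List.enumerate_cons, List.foldl_cons, ih]
    simp only [pvColW]
    by_cases hguard : c = 'I' ∨ d.contains s = true
    · rw [if_pos hguard]
      by_cases hi : i = s
      · subst hi
        rw [if_pos rfl, pvColW_lt cs (i + 1) i (by omega)]
        rcases hguard with hc | hk
        · simp [hc]
        · rcases Option.isSome_iff_exists.mp
            (by rw [← PySem.Dict.contains_eq_isSome_get? d i]; exact hk) with ⟨v, hv⟩
          rw [hv]
          rfl
      · rw [if_neg hi]
    · rw [if_neg hguard]
      rw [not_or] at hguard
      obtain ⟨hc, hk⟩ := hguard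
      by_cases hi : i = s
      · subst hi
        have hnone : d.get? i = none := by
          have h1 := PySem.Dict.contains_eq_isSome_get? d i
          have hk' : d.contains i = false := by
            cases h : d.contains i
            · rfl
            · exact absurd h hk
          rw [hk'] at h1
          exact Option.not_isSome_iff_eq_none.mp (by rw [← h1]; simp)
        rw [if_pos rfl, pvColW_lt cs (i + 1) i (by omega),
          PySem.Dict.get?_insert_self d i c, hnone]
        simp [hc]
      · rw [PySem.Dict.get?_insert_of_ne d c hi, if_neg hi]

-- outer loop of A
lemma pvOuter_get? (g : List (Int × String)) (n : Nat) :
    ∀ (d : PySem.Dict Int Char) (i : Int),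
    (g.foldl (fun mb p =>
        if p.2.toList = List.replicate n 'I' then mb
        else (PySem.List.enumerate p.2.toList 0).foldl (fun mb qc =>
          if qc.2 = 'I' ∨ mb.contains qc.1 then mb
          else mb.insert qc.1 qc.2) mb) d).get? i
    = (d.get? i).or (g.findSome? (fun p => pvColW p.2.toList 0 i)) := by
  induction g with
  | nil => intro d i; simp
  | cons p g ih =>
    intro d i
    rw [List.foldl_cons]
    by_cases hp : p.2.toList = List.replicate n 'I'
    · rw [if_pos hp, ih]
      simp [hp, pvColW_replicate]
    · rw [if_neg hp, ih, pvInner_get?]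
      cases hcw : pvColW p.2.toList 0 i <;> simp [hcw]

-- pointwise-equal functions give equal findSome?
lemma pvFindSome?_congr {α β : Type} (f g : α → Option β) (l : List α)
    (h : ∀ x ∈ l, f x = g x) : l.findSome? f = l.findSome? g := by
  induction l with
  | nil => rfl
  | cons x xs ih =>
    simp only [List.findSome?_cons, h x (by simp)]
    cases g x with
    | none => exact ih (fun y hy => h y (by simp [hy]))
    | some v => rfl

-- ===== VERDICT (by name: the statement is the Claim_ definition above) =====
theorem get_measure_pauli_from_commuting_terms_py_spec : Claim_equal_get_measure_pauli_from_commuting_terms_py := by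
  intro group _ hpre
  unfold Spec_get_measure_pauli_from_commuting_terms_py
  cases group with
  | nil => exact absurd rfl hpre
  | cons g0 gs =>
    unfold get_measure_pauli_from_commuting_terms_py get_measure_pauli_from_commuting_terms_py_alt
    simp only
    set n : Nat := g0.2.toList.length with hn
    set grp : List (Int × String) := g0 :: gs with hg
    set mb : PySem.Dict Int Char :=
      grp.foldl (fun mb p =>
        if p.2.toList = List.replicate n 'I' then mb
        else (PySem.List.enumerate p.2.toList 0).foldl (fun mb qc =>
          if qc.2 = 'I' ∨ mb.contains qc.1 then mb
          else mb.insert qc.1 qc.2) mb) PySem.Dict.empty with hmb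
    -- the fresh-key fold over range(n) appends (i, mb.getD i 'I') in order
    have hitems :
        ((PySem.List.pyRange 0 (n : Int) 1).foldl
          (fun d i => d.insert i (mb.getD i 'I')) PySem.Dict.empty).items
        = PySem.Dict.empty.items ++
            (PySem.List.pyRange 0 (n : Int) 1).map (fun i => (i, mb.getD i 'I')) := by
      exact PySem.Dict.items_foldl_insert_fresh (PySem.List.pyRange 0 (n : Int) 1)
        (fun i => i) (fun i => mb.getD i 'I') PySem.Dict.empty
        (fun a _ => PySem.Dict.contains_empty a)
        (by simpa using PySem.List.nodup_pyRange_one 0 (n : Int))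
    have hvals :
        ((PySem.List.pyRange 0 (n : Int) 1).foldl
          (fun d i => d.insert i (mb.getD i 'I')) PySem.Dict.empty).values
        = (PySem.List.pyRange 0 (n : Int) 1).map (fun i => mb.getD i 'I') := by
      simp [PySem.Dict.values, hitems]
      rfl
    rw [hvals]
    congr 1
    rw [PySem.List.pyRange_one 0 (n : Int)]
    simp only [List.map_map]
    have : ((n : Int) - 0).toNat = n := by omega
    rw [this]
    apply List.map_congr_left
    intro k hk
    have hk' : k < n := List.mem_range.mp hk
    -- A's entry at position k
    have hget : mb.get? ((0 : Int) + k) = grp.findSome? (fun p => pvColW p.2.toList 0 ((0:Int) + k)) := by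
      rw [hmb, pvOuter_get?]
      simp
    simp only [Function.comp]
    rw [PySem.Dict.getD_eq_get?_getD, hget]
    have hcol : ∀ p : Int × String, pvColW p.2.toList 0 ((0:Int) + (k : Int)) =
        (if h : k < p.2.toList.length then
          (if p.2.toList[k] ≠ 'I' then some (p.2.toList[k]) else none) else none) := by
      intro p; exact pvColW_nat p.2.toList 0 k
    rw [pvFindSome?_congr _ _ _ (fun p _ => hcol p)]
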